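-- pv_equiv track=rewrite | github.com/jz33/LeetCodeSolutions | 420 Strong Password Checker.py | getRepetitionCost
-- ===== SOURCE A (Python) =====
-- from typing import List
--
-- from heapq import heappush, heappop, heapify
--
-- def getRepetitionCost(reps: List[int], toDelete: int) -> int:
--     '''
--     If password is longer than 20, some chars need to be deleted.
--     To be greedy, delete chars on repetition substrings.
--     Which repetition to delete?
--     Notice eventually, the minimum cost to modify repetition strings
--     to make them valid is sum(r // 3 for r in reps), therefore,
--     choose those whose mod % 3 value is closest to 0
--     '''
--     if not reps:
--         return 0
--     if len(reps) == 1: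
--         return (max(0, reps[0] - toDelete)) // 3
--
--     heap = [(r % 3, r) for r in reps]
--     heapify(heap)
--     for _ in range(toDelete):
--         if not heap:
--             return 0
--         _,r = heappop(heap)
--         r -= 1
--         if r >= 3:
--             heappush(heap, (r % 3, r))
--     return sum(r // 3 for _, r in heap)
-- ===== SOURCE B (Python) =====
-- from typing import List
--
-- def getRepetitionCost(reps: List[int], toDelete: int) -> int:
--     '''
--     Batch version: the heap in the original always serves whole "runs" on the
--     element minimal in key order (r % 3, r), so deletions can be accounted
--     class by class (all mod-0 elements, then mod-1, then the merged mod-2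
--     pool, each in ascending order) without simulating single deletions.
--     '''
--     if not reps:
--         return 0
--     if len(reps) == 1:
--         return max(0, reps[0] - toDelete) // 3
--
--     zeros = sorted(r for r in reps if r % 3 == 0)
--     ones = sorted(r for r in reps if r % 3 == 1)
--     highs = [r for r in reps if r % 3 == 2]
--
--     d = toDelete
--     survivors = []   # elements the deletions never (fully) reach
--     twos = []        # elements re-queued at class 2 after a finished run
--
--     for r in zeros + ones:
--         if d <= 0:
--             survivors.append(r)
--         elif r < 3:
--             d -= 1                        # one pop, then discarded
--         else:
--             t = min(r % 3 + 1, d, r - 2)  # pops this run can spend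
--             d -= t
--             r -= t
--             if r >= 3:
--                 if r % 3 == 2:
--                     twos.append(r)        # full run served, re-queued
--                 else:
--                     survivors.append(r)   # budget ran out mid-run
--
--     for r in sorted(highs + twos):
--         if d <= 0:
--             survivors.append(r)
--         elif r < 3:
--             d -= 1                        # one pop, then discarded
--         elif d >= r - 2:
--             d -= r - 2                    # eaten down to 2 and discarded
--         else:
--             survivors.append(r - d)       # budget dies inside this element
--             d = 0
--
--     return sum(r // 3 for r in survivors)
-- ===== Notes on version B (the rewrite author's own statement) =====
-- stated objective: faster
-- what changed: A simulates every single deletion on a heap keyed by (r % 3, r); B exploits that the heap always serves whole runs on the minimal element, so it sorts the lengths into the three residue classes once and accounts the deletion budget class by class in bulk (all mod-0 elements, then mod-1, then the merged mod-2 pool, where a whole element is eliminated at cost r - 2 in one arithmetic step).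
import Mathlib
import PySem

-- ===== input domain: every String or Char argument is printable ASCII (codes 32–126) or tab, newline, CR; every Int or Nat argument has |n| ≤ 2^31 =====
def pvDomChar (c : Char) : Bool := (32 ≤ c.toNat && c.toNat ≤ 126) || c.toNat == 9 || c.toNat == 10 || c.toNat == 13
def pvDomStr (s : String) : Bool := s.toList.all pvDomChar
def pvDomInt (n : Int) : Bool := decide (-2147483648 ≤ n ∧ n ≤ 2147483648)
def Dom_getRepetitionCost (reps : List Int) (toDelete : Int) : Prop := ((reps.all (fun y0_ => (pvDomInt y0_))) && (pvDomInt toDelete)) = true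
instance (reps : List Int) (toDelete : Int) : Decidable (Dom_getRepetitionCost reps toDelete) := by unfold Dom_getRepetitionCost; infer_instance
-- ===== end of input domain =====

-- B replaces A's per-deletion heap simulation by one batched, class-by-class account
-- of the deletions (objective: faster — A is Θ(toDelete·log n), B is O(n log n)).

-- ===== PORT A =====
-- heapq is modeled as a multiset with minimum extraction: heappop returns the
-- lexicographically smallest tuple (exactly heapq's observable behaviour),
-- heappush adds the tuple; the heap's internal array order never affects A's result.
def pairLt (a b : Int × Int) : Bool := decide (a.1 < b.1 ∨ (a.1 = b.1 ∧ a.2 < b.2))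

def heapMin (p : Int × Int) (h : List (Int × Int)) : Int × Int :=
  h.foldl (fun m q => if pairLt q m then q else m) p

-- the `for _ in range(toDelete)` loop; `none` = the early `return 0` on an empty heap
def aLoop : Nat → List (Int × Int) → Option (List (Int × Int))
  | 0, h => some h
  | _+1, [] => none
  | k+1, p :: hs =>
    let m := heapMin p hs
    let h1 := (p :: hs).erase m
    let r := m.2 - 1
    if 3 ≤ r then aLoop k ((PySem.Int.mod r 3, r) :: h1) else aLoop k h1

def getRepetitionCost (reps : List Int) (toDelete : Int) : Int :=
  match reps with
  | [] => 0
  | [r] => PySem.Int.floordiv (max 0 (r - toDelete)) 3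
  | _ =>
    -- range(toDelete) performs toDelete.toNat iterations
    match aLoop toDelete.toNat (reps.map (fun r => (PySem.Int.mod r 3, r))) with
    | none => 0
    | some h => (h.map (fun p => PySem.Int.floordiv p.2 3)).sum

-- ===== PORT B =====
-- body of Source B's first loop (state: d, survivors, twos)
def lowsStep (st : Int × List Int × List Int) (r : Int) : Int × List Int × List Int :=
  if st.1 ≤ 0 then (st.1, st.2.1 ++ [r], st.2.2)
  else if r < 3 then (st.1 - 1, st.2.1, st.2.2)
  else
    let t := min (min (PySem.Int.mod r 3 + 1) st.1) (r - 2)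
    if 3 ≤ r - t then
      if PySem.Int.mod (r - t) 3 = 2 then (st.1 - t, st.2.1, st.2.2 ++ [r - t])
      else (st.1 - t, st.2.1 ++ [r - t], st.2.2)
    else (st.1 - t, st.2.1, st.2.2)

-- body of Source B's second loop (state: d, survivors)
def poolStep (st : Int × List Int) (r : Int) : Int × List Int :=
  if st.1 ≤ 0 then (st.1, st.2 ++ [r])
  else if r < 3 then (st.1 - 1, st.2)
  else if st.1 ≥ r - 2 then (st.1 - (r - 2), st.2)
  else (0, st.2 ++ [r - st.1])

def getRepetitionCost_alt (reps : List Int) (toDelete : Int) : Int :=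
  if reps = [] then 0
  else if reps.length = 1 then PySem.Int.floordiv (max 0 (reps.headI - toDelete)) 3
  else
    let zeros := PySem.List.sorted (reps.filter (fun r => PySem.Int.mod r 3 == 0)) (fun r => r)
    let ones  := PySem.List.sorted (reps.filter (fun r => PySem.Int.mod r 3 == 1)) (fun r => r)
    let highs := reps.filter (fun r => PySem.Int.mod r 3 == 2)
    let s1 := (zeros ++ ones).foldl lowsStep (toDelete, [], [])
    let pool := PySem.List.sorted (highs ++ s1.2.2) (fun r => r)
    let s2 := pool.foldl poolStep (s1.1, s1.2.1)
    (s2.2.map (fun r => PySem.Int.floordiv r 3)).sum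

-- ===== PRECONDITION & SPEC =====
def Spec_getRepetitionCost (reps : List Int) (toDelete : Int) (out : Int) : Prop := out = getRepetitionCost_alt reps toDelete
instance (reps : List Int) (toDelete : Int) (out : Int) : Decidable (Spec_getRepetitionCost reps toDelete out) := by unfold Spec_getRepetitionCost; infer_instance

-- ===== CLAIM (what is proved, stated in full; the proofs are below) =====
def Claim_equal_getRepetitionCost : Prop := ∀ (reps : List Int) (toDelete : Int), Dom_getRepetitionCost reps toDelete → Spec_getRepetitionCost reps toDelete (getRepetitionCost reps toDelete)

-- ===== LEMMAS AND PROOFS =====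

-- key order of the heap: (r % 3, r), lexicographically
def kLE (a b : Int) : Prop := a % 3 < b % 3 ∨ (a % 3 = b % 3 ∧ a ≤ b)

def kmin (x : Int) (s : List Int) : Int :=
  s.foldl (fun m y => if y % 3 < m % 3 ∨ (y % 3 = m % 3 ∧ y < m) then y else m) x

def sumdiv (s : List Int) : Int := (s.map (fun r => PySem.Int.floordiv r 3)).sum

-- the heap process on the multiset of repetition lengths
def sim : Nat → List Int → Int
  | 0, s => sumdiv s
  | _+1, [] => 0
  | k+1, x :: rest =>
    let m := kmin x rest
    let s' := (x :: rest).erase m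
    if 3 ≤ m - 1 then sim k ((m - 1) :: s') else sim k s'

lemma pymod3 (r : Int) : PySem.Int.mod r 3 = r % 3 :=
  PySem.Int.mod_eq_emod_of_pos (by norm_num)

lemma kLE_refl (a : Int) : kLE a a := by unfold kLE; omega

lemma kLE_trans {a b c : Int} (h1 : kLE a b) (h2 : kLE b c) : kLE a c := by
  unfold kLE at *; omega

lemma kLE_antisymm {a b : Int} (h1 : kLE a b) (h2 : kLE b a) : a = b := by
  unfold kLE at *; omega

lemma kmin_spec : ∀ (s : List Int) (x : Int),
    kmin x s ∈ x :: s ∧ ∀ y ∈ x :: s, kLE (kmin x s) y := by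
  intro s
  induction s with
  | nil =>
    intro x
    refine ⟨by simp [kmin], ?_⟩
    intro y hy
    simp only [List.mem_cons, List.not_mem_nil, or_false] at hy
    subst hy; simpa [kmin] using kLE_refl y
  | cons y s ih =>
    intro x
    have hfold : kmin x (y :: s)
        = kmin (if y % 3 < x % 3 ∨ (y % 3 = x % 3 ∧ y < x) then y else x) s := rfl
    set x' := if y % 3 < x % 3 ∨ (y % 3 = x % 3 ∧ y < x) then y else x with hx'
    obtain ⟨hmem, hmin⟩ := ih x'
    have hx'le : kLE x' x ∧ kLE x' y := by
      rw [hx']; split_ifs with h <;> unfold kLE <;> omega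
    have hx'mem : x' = x ∨ x' = y := by
      rw [hx']; split_ifs <;> simp
    constructor
    · rw [hfold]
      rcases List.mem_cons.mp hmem with h | h
      · rcases hx'mem with h2 | h2 <;> rw [h, h2] <;> simp
      · simp [h]
    · intro z hz
      rw [hfold]
      rcases List.mem_cons.mp hz with rfl | hz
      · exact kLE_trans (hmin x' (List.mem_cons_self)) hx'le.1
      rcases List.mem_cons.mp hz with rfl | hz
      · exact kLE_trans (hmin x' (List.mem_cons_self)) hx'le.2
      · exact hmin z (List.mem_cons_of_mem _ hz)

lemma kmin_unique (x : Int) (s : List Int) (m : Int) (hm : m ∈ x :: s)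
    (hmin : ∀ y ∈ x :: s, kLE m y) : kmin x s = m :=
  kLE_antisymm ((kmin_spec s x).2 m hm) (hmin _ (kmin_spec s x).1)

lemma sumdiv_append (s t : List Int) : sumdiv (s ++ t) = sumdiv s + sumdiv t := by
  simp [sumdiv]

lemma sumdiv_cons (r : Int) (s : List Int) :
    sumdiv (r :: s) = PySem.Int.floordiv r 3 + sumdiv s := by
  simp [sumdiv]

lemma sumdiv_perm {s t : List Int} (h : s.Perm t) : sumdiv s = sumdiv t :=
  List.Perm.sum_eq (h.map _)

lemma sim_zero (s : List Int) : sim 0 s = sumdiv s := rfl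

lemma sim_nil (k : Nat) : sim k [] = 0 := by cases k <;> rfl

lemma sumdiv_nil : sumdiv ([] : List Int) = 0 := rfl

lemma sim_perm : ∀ (k : Nat) {s t : List Int}, s.Perm t → sim k s = sim k t := by
  intro k
  induction k with
  | zero => intro s t h; exact sumdiv_perm h
  | succ k ih =>
    intro s t h
    cases s with
    | nil => rw [h.symm.eq_nil]
    | cons x s' =>
      cases t with
      | nil => exact absurd h.eq_nil (by simp)
      | cons b t' =>
        have hm : kmin x s' = kmin b t' := by
          apply kmin_unique
          · exact h.symm.subset (kmin_spec t' b).1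
          · intro y hy; exact (kmin_spec t' b).2 y (h.subset hy)
        have he : ((x :: s').erase (kmin b t')).Perm ((b :: t').erase (kmin b t')) :=
          h.erase _
        simp only [sim, hm]
        split_ifs with hc
        · exact ih (he.cons _)
        · exact ih he

lemma kmin_eq_head (x : Int) (rest : List Int) (hmin : ∀ y ∈ rest, kLE x y) :
    kmin x rest = x := by
  refine kmin_unique x rest x List.mem_cons_self ?_
  intro y hy
  rcases List.mem_cons.mp hy with rfl | hy
  · exact kLE_refl _
  · exact hmin y hy

lemma sim_cons_ge4 (k : Nat) (x : Int) (rest : List Int) (hx : 4 ≤ x)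
    (hmin : ∀ y ∈ rest, kLE x y) :
    sim (k+1) (x :: rest) = sim k ((x - 1) :: rest) := by
  simp only [sim, kmin_eq_head x rest hmin, List.erase_cons_head]
  rw [if_pos (by omega)]

lemma sim_cons_le3 (k : Nat) (x : Int) (rest : List Int) (hx : x ≤ 3)
    (hmin : ∀ y ∈ rest, kLE x y) :
    sim (k+1) (x :: rest) = sim k rest := by
  simp only [sim, kmin_eq_head x rest hmin, List.erase_cons_head]
  rw [if_neg (by omega)]

lemma min_dec (x : Int) (rest : List Int) (h1 : 1 ≤ x % 3)
    (hmin : ∀ y ∈ rest, kLE x y) : ∀ y ∈ rest, kLE (x - 1) y := by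
  intro y hy
  have := hmin y hy
  unfold kLE at *
  omega

-- bridge A helpers: on well-formed pairs the heap order is the key order on values
lemma heapMin_wf : ∀ (h : List (Int × Int)) (p : Int × Int), p.1 = p.2 % 3 →
    (∀ q ∈ h, q.1 = q.2 % 3) →
    heapMin p h = (kmin p.2 (h.map Prod.snd) % 3, kmin p.2 (h.map Prod.snd)) := by
  intro h
  induction h with
  | nil =>
    intro p hp _
    simp only [heapMin, List.foldl_nil, List.map_nil, kmin]
    exact Prod.ext hp rfl
  | cons q h ih =>
    intro p hp hq
    have hfold : heapMin p (q :: h) = heapMin (if pairLt q p then q else p) h := rfl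
    have hkf : kmin p.2 ((q :: h).map Prod.snd)
        = kmin (if q.2 % 3 < p.2 % 3 ∨ (q.2 % 3 = p.2 % 3 ∧ q.2 < p.2) then q.2 else p.2)
            (h.map Prod.snd) := rfl
    have hq1 := hq q List.mem_cons_self
    have hcond : (pairLt q p = true) ↔ (q.2 % 3 < p.2 % 3 ∨ (q.2 % 3 = p.2 % 3 ∧ q.2 < p.2)) := by
      simp [pairLt, hp, hq1]
    have hqrest : ∀ r ∈ h, r.1 = r.2 % 3 := fun r hr => hq r (List.mem_cons_of_mem _ hr)
    rw [hfold, hkf]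
    by_cases hc : q.2 % 3 < p.2 % 3 ∨ (q.2 % 3 = p.2 % 3 ∧ q.2 < p.2)
    · rw [if_pos (hcond.mpr hc), if_pos hc]
      exact ih q hq1 hqrest
    · rw [if_neg (fun hh => hc (hcond.mp hh)), if_neg hc]
      exact ih p hp hqrest

lemma erase_map_snd : ∀ (h : List (Int × Int)) (m : Int × Int),
    (∀ p ∈ h, p.1 = p.2 % 3) → m.1 = m.2 % 3 →
    (h.erase m).map Prod.snd = (h.map Prod.snd).erase m.2 := by
  intro h
  induction h with
  | nil => intro m _ _; simp
  | cons q h ih =>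
    intro m hwf hm
    by_cases hqm : q = m
    · subst hqm
      rw [List.erase_cons_head, List.map_cons, List.erase_cons_head]
    · have hq2 : q.2 ≠ m.2 := by
        intro h2
        exact hqm (Prod.ext (by rw [hwf q List.mem_cons_self, h2, ← hm]) h2)
      rw [List.erase_cons_tail (by simpa using hqm), List.map_cons, List.map_cons,
          List.erase_cons_tail (by simpa using hq2),
          ih m (fun p hp => hwf p (List.mem_cons_of_mem _ hp)) hm]

-- bridge A: the pair-heap loop computes `sim` on the multiset of values
lemma aLoop_sim : ∀ (k : Nat) (h : List (Int × Int)) (s : List Int),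
    (h.map Prod.snd).Perm s → (∀ p ∈ h, p.1 = p.2 % 3) →
    (match aLoop k h with
     | none => 0
     | some h' => (h'.map (fun p => PySem.Int.floordiv p.2 3)).sum) = sim k s := by
  intro k
  induction k with
  | zero =>
    intro h s hperm _
    simp only [aLoop]
    have hmm : h.map (fun p => PySem.Int.floordiv p.2 3)
        = (h.map Prod.snd).map (fun r => PySem.Int.floordiv r 3) := by
      rw [List.map_map]; rfl
    rw [hmm, sim_zero]
    exact List.Perm.sum_eq (hperm.map _)
  | succ k ih =>
    intro h s hperm hwf
    cases h with
    | nil =>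
      have hs : s = [] := (by simpa using hperm : List.Perm [] s).symm.eq_nil
      subst hs
      rfl
    | cons p hs =>
      cases s with
      | nil =>
        exact absurd (by simpa using hperm : List.Perm (p.2 :: hs.map Prod.snd) []).eq_nil
          (by simp)
      | cons a s' =>
        have hwfp := hwf p List.mem_cons_self
        have hwfhs : ∀ q ∈ hs, q.1 = q.2 % 3 := fun q hq => hwf q (List.mem_cons_of_mem _ hq)
        have hmins := heapMin_wf hs p hwfp hwfhs
        have hperm' : (p.2 :: hs.map Prod.snd).Perm (a :: s') := by simpa using hperm
        have hka : kmin a s' = kmin p.2 (hs.map Prod.snd) := by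
          apply kmin_unique
          · exact hperm'.subset (kmin_spec (hs.map Prod.snd) p.2).1
          · intro y hy
            exact (kmin_spec _ p.2).2 y (hperm'.symm.subset hy)
        have hwfm : ((kmin p.2 (hs.map Prod.snd) % 3, kmin p.2 (hs.map Prod.snd)) : Int × Int).1
            = ((kmin p.2 (hs.map Prod.snd) % 3, kmin p.2 (hs.map Prod.snd)) : Int × Int).2 % 3 := rfl
        have herase : (((p :: hs).erase (heapMin p hs)).map Prod.snd)
            = (p.2 :: hs.map Prod.snd).erase (kmin p.2 (hs.map Prod.snd)) := by
          rw [hmins, erase_map_snd (p :: hs) _ hwf hwfm]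
          rfl
        have hwferase : ∀ q ∈ (p :: hs).erase (heapMin p hs), q.1 = q.2 % 3 :=
          fun q hq => hwf q (List.mem_of_mem_erase hq)
        have hperme : (((p :: hs).erase (heapMin p hs)).map Prod.snd).Perm
            ((a :: s').erase (kmin p.2 (hs.map Prod.snd))) := by
          rw [herase]
          exact hperm'.erase _
        simp only [aLoop, sim, hka, hmins]
        by_cases hc : (3 : Int) ≤ kmin p.2 (hs.map Prod.snd) - 1
        · rw [if_pos hc, if_pos hc]
          apply ih
          · simp only [List.map_cons]
            rw [hmins] at hperme
            exact hperme.cons _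
          · intro q hq
            rcases List.mem_cons.mp hq with rfl | hq
            · simp [pymod3]
            · rw [hmins] at hwferase
              exact hwferase q hq
        · rw [if_neg hc, if_neg hc]
          apply ih
          · rw [hmins] at hperme; exact hperme
          · rw [hmins] at hwferase; exact hwferase

-- a convenient permutation: a re-queued element moves to the class-2 pool
lemma perm_snoc_mid (v : Int) (A B C : List Int) :
    (A ++ (B ++ (C ++ [v]))).Perm (v :: (A ++ (B ++ C))) := by
  have h1 : A ++ (B ++ (C ++ [v])) = (A ++ (B ++ C)) ++ [v] := by
    simp [List.append_assoc]
  rw [h1]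
  exact List.perm_append_singleton v _

-- eliminating the minimal class-2 element costs r - 2 deletions
lemma elim : ∀ (k : Nat) (r : Int) (rest : List Int), r % 3 = 2 → 4 ≤ r →
    (∀ y ∈ rest, kLE r y) →
    sim k (r :: rest) =
      if (r - 2 : Int) ≤ (k : Int) then sim (k - (r - 2).toNat) rest
      else sumdiv ((r - (k : Int)) :: rest) := by
  intro k
  induction k using Nat.strong_induction_on with
  | _ k ih =>
    intro r rest h2 h4 hmin
    have hr5 : r = 5 ∨ 8 ≤ r := by omega
    have hmin1 : ∀ y ∈ rest, kLE (r - 1) y := min_dec r rest (by omega) hmin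
    have hmin2 : ∀ y ∈ rest, kLE (r - 1 - 1) y := min_dec (r - 1) rest (by omega) hmin1
    match k with
    | 0 =>
      rw [if_neg (by omega), sim_zero]
      norm_num
    | 1 =>
      rw [sim_cons_ge4 0 r rest h4 hmin, sim_zero, if_neg (by omega)]
      norm_num
    | 2 =>
      rw [sim_cons_ge4 1 r rest h4 hmin, sim_cons_ge4 0 (r - 1) rest (by omega) hmin1,
        sim_zero, if_neg (by omega)]
      have : r - 1 - 1 = r - (2 : Int) := by ring
      rw [this]
      norm_num
    | (k' + 3) =>
      rw [show k' + 3 = (k' + 2) + 1 from rfl, sim_cons_ge4 (k' + 2) r rest h4 hmin,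
        show k' + 2 = (k' + 1) + 1 from rfl, sim_cons_ge4 (k' + 1) (r - 1) rest (by omega) hmin1]
      rcases hr5 with rfl | h8
      · rw [sim_cons_le3 k' (5 - 1 - 1) rest (by omega) hmin2, if_pos (by omega),
          show (k' + 3) - ((5 : Int) - 2).toNat = k' from by omega]
      · rw [sim_cons_ge4 k' (r - 1 - 1) rest (by omega) hmin2]
        have hmin3 : ∀ y ∈ rest, kLE (r - 1 - 1 - 1) y := by
          intro y hy
          have := hmin y hy
          unfold kLE at *
          omega
        rw [ih k' (by omega) (r - 1 - 1 - 1) rest (by omega) (by omega) hmin3]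
        by_cases hcase : (r - 2 : Int) ≤ ((k' + 3 : Nat) : Int)
        · rw [if_pos (by push_cast; omega), if_pos hcase]
          congr 1
          omega
        · rw [if_neg (by push_cast at hcase ⊢; omega), if_neg hcase]
          congr 1
          push_cast
          ring

-- phase 1: Source B's first loop accounts the deletions spent on classes 0 and 1
lemma ph : ∀ (low : List Int) (d : Int) (surv twos highs : List Int),
    low.Pairwise kLE → (∀ x ∈ low, x % 3 ≤ 1) → (∀ y ∈ highs ++ twos, y % 3 = 2) →
    sumdiv (low.foldl lowsStep (d, surv, twos)).2.1
      + sim (low.foldl lowsStep (d, surv, twos)).1.toNat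
          (highs ++ (low.foldl lowsStep (d, surv, twos)).2.2)
    = sumdiv surv + sim d.toNat (low ++ (highs ++ twos)) := by
  intro low
  induction low with
  | nil => intro d surv twos highs _ _ _; simp
  | cons r low ih =>
    intro d surv twos highs hpw hcls h2
    obtain ⟨hhead, hpw'⟩ := List.pairwise_cons.mp hpw
    have hcls' : ∀ x ∈ low, x % 3 ≤ 1 := fun x hx => hcls x (List.mem_cons_of_mem _ hx)
    have hr : r % 3 ≤ 1 := hcls r List.mem_cons_self
    have hmin : ∀ y ∈ low ++ (highs ++ twos), kLE r y := by
      intro y hy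
      rcases List.mem_append.mp hy with hy | hy
      · exact hhead y hy
      · have := h2 y hy; unfold kLE; omega
    have hconsapp : (r :: low) ++ (highs ++ twos) = r :: (low ++ (highs ++ twos)) := rfl
    rw [List.foldl_cons, hconsapp]
    by_cases hd : d ≤ 0
    · rw [show lowsStep (d, surv, twos) r = (d, surv ++ [r], twos) from by
          simp [lowsStep, hd],
        ih _ _ _ _ hpw' hcls' h2,
        show d.toNat = 0 from by omega, sim_zero, sim_zero]
      simp only [sumdiv_append, sumdiv_cons, sumdiv_nil]
      ring
    · by_cases hr3 : r < 3
      · rw [show lowsStep (d, surv, twos) r = (d - 1, surv, twos) from by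
            simp [lowsStep, hd, hr3],
          ih _ _ _ _ hpw' hcls' h2,
          show d.toNat = (d - 1).toNat + 1 from by omega,
          sim_cons_le3 _ r _ (by omega) hmin]
      · push_neg at hr3
        by_cases hcz : r % 3 = 0
        · have ht : min (min (r % 3 + 1) d) (r - 2) = 1 := by omega
          by_cases hr4 : 4 ≤ r
          · -- class 0, r ≥ 4: one pop, re-queued at class 2
            have h2x : ∀ y ∈ highs ++ (twos ++ [r - 1]), y % 3 = 2 := by
              intro y hy
              rcases List.mem_append.mp hy with hy | hy
              · exact h2 y (List.mem_append.mpr (Or.inl hy))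
              rcases List.mem_append.mp hy with hy | hy
              · exact h2 y (List.mem_append.mpr (Or.inr hy))
              · have : y = r - 1 := by simpa using hy
                omega
            rw [show lowsStep (d, surv, twos) r = (d - 1, surv, twos ++ [r - 1]) from by
                simp only [lowsStep, pymod3]
                rw [if_neg (by omega), if_neg (by omega), ht, if_pos (by omega),
                  if_pos (by omega)],
              ih _ _ _ _ hpw' hcls' h2x,
              show d.toNat = (d - 1).toNat + 1 from by omega,
              sim_cons_ge4 _ r _ hr4 hmin]
            congr 1
            exact sim_perm _ (perm_snoc_mid (r - 1) low highs twos)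
          · -- r = 3: one pop and it is gone
            rw [show lowsStep (d, surv, twos) r = (d - 1, surv, twos) from by
                simp only [lowsStep, pymod3]
                rw [if_neg (by omega), if_neg (by omega), ht, if_neg (by omega)],
              ih _ _ _ _ hpw' hcls' h2,
              show d.toNat = (d - 1).toNat + 1 from by omega,
              sim_cons_le3 _ r _ (by omega) hmin]
        · -- class 1 (so r ≥ 4)
          have hc1 : r % 3 = 1 := by omega
          have hr4 : 4 ≤ r := by omega
          have hmin' : ∀ y ∈ low ++ (highs ++ twos), kLE (r - 1) y :=
            min_dec _ _ (by omega) hmin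
          by_cases hd1 : d = 1
          · -- budget dies after the first pop of the run
            have ht : min (min (r % 3 + 1) d) (r - 2) = 1 := by omega
            rw [show lowsStep (d, surv, twos) r = (0, surv ++ [r - 1], twos) from by
                simp only [lowsStep, pymod3]
                rw [if_neg (by omega), if_neg (by omega), ht, if_pos (by omega),
                  if_neg (by omega), hd1]
                norm_num,
              ih _ _ _ _ hpw' hcls' h2,
              show d.toNat = 0 + 1 from by omega,
              sim_cons_ge4 0 r _ hr4 hmin,
              show (0 : Int).toNat = 0 from rfl, sim_zero, sim_zero]
            simp only [sumdiv_append, sumdiv_cons, sumdiv_nil]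
            ring
          · -- d ≥ 2: the full 2-pop run is served
            have hd2 : 2 ≤ d := by omega
            have ht : min (min (r % 3 + 1) d) (r - 2) = 2 := by omega
            by_cases hr5 : r = 4
            · -- 4 → 2: eliminated by the run
              rw [show lowsStep (d, surv, twos) r = (d - 2, surv, twos) from by
                  simp only [lowsStep, pymod3]
                  rw [if_neg (by omega), if_neg (by omega), ht, if_neg (by omega)],
                ih _ _ _ _ hpw' hcls' h2,
                show d.toNat = ((d - 2).toNat + 1) + 1 from by omega,
                sim_cons_ge4 _ r _ hr4 hmin,
                sim_cons_le3 _ (r - 1) _ (by omega) hmin']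
            · -- r ≥ 7: re-queued at class 2 with value r - 2
              have hr7 : 7 ≤ r := by omega
              have h2x : ∀ y ∈ highs ++ (twos ++ [r - 2]), y % 3 = 2 := by
                intro y hy
                rcases List.mem_append.mp hy with hy | hy
                · exact h2 y (List.mem_append.mpr (Or.inl hy))
                rcases List.mem_append.mp hy with hy | hy
                · exact h2 y (List.mem_append.mpr (Or.inr hy))
                · have : y = r - 2 := by simpa using hy
                  omega
              rw [show lowsStep (d, surv, twos) r = (d - 2, surv, twos ++ [r - 2]) from by
                  simp only [lowsStep, pymod3]
                  rw [if_neg (by omega), if_neg (by omega), ht, if_pos (by omega),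
                    if_pos (by omega)],
                ih _ _ _ _ hpw' hcls' h2x,
                show d.toNat = ((d - 2).toNat + 1) + 1 from by omega,
                sim_cons_ge4 _ r _ hr4 hmin,
                sim_cons_ge4 _ (r - 1) _ (by omega) hmin',
                show r - 1 - 1 = r - 2 from by ring]
              congr 1
              exact sim_perm _ (perm_snoc_mid (r - 2) low highs twos)

-- phase 2: Source B's second loop accounts the deletions spent on the class-2 pool
lemma ph2 : ∀ (pool : List Int) (d : Int) (surv : List Int),
    pool.Pairwise (· ≤ ·) → (∀ x ∈ pool, x % 3 = 2) →
    sumdiv (pool.foldl poolStep (d, surv)).2 = sumdiv surv + sim d.toNat pool := by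
  intro pool
  induction pool with
  | nil => intro d surv _ _; simp [sim_nil, sumdiv]
  | cons r pool ih =>
    intro d surv hpw hcls
    obtain ⟨hhead, hpw'⟩ := List.pairwise_cons.mp hpw
    have hcls' : ∀ x ∈ pool, x % 3 = 2 := fun x hx => hcls x (List.mem_cons_of_mem _ hx)
    have hr2 : r % 3 = 2 := hcls r List.mem_cons_self
    have hmin : ∀ y ∈ pool, kLE r y := by
      intro y hy
      have h1 := hhead y hy
      have h2 := hcls' y hy
      unfold kLE
      omega
    rw [List.foldl_cons]
    by_cases hd : d ≤ 0
    · rw [show poolStep (d, surv) r = (d, surv ++ [r]) from by simp [poolStep, hd],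
        ih _ _ hpw' hcls', show d.toNat = 0 from by omega,
        sim_zero, sim_zero]
      simp only [sumdiv_append, sumdiv_cons, sumdiv_nil]
      ring
    · by_cases hr3 : r < 3
      · rw [show poolStep (d, surv) r = (d - 1, surv) from by simp [poolStep, hd, hr3],
          ih _ _ hpw' hcls',
          show d.toNat = (d - 1).toNat + 1 from by omega,
          sim_cons_le3 _ r pool (by omega) hmin]
      · have hr4 : 4 ≤ r := by omega
        by_cases hde : d ≥ r - 2
        · rw [show poolStep (d, surv) r = (d - (r - 2), surv) from by
              simp [poolStep, hd, hr3, hde],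
            ih _ _ hpw' hcls', elim d.toNat r pool hr2 hr4 hmin, if_pos (by omega),
            show d.toNat - (r - 2).toNat = (d - (r - 2)).toNat from by omega]
        · rw [show poolStep (d, surv) r = (0, surv ++ [r - d]) from by
              simp [poolStep, hd, hr3, hde],
            ih _ _ hpw' hcls', elim d.toNat r pool hr2 hr4 hmin, if_neg (by omega),
            show ((d.toNat : Int)) = d from by omega,
            show (0 : Int).toNat = 0 from rfl,
            sim_zero]
          simp only [sumdiv_append, sumdiv_cons, sumdiv_nil]
          ring

-- everything Source B ever appends to `twos` is ≡ 2 (mod 3)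
lemma lowsStep_twos (st : Int × List Int × List Int) (r : Int)
    (h : ∀ y ∈ st.2.2, y % 3 = 2) : ∀ y ∈ (lowsStep st r).2.2, y % 3 = 2 := by
  intro y hy
  simp only [lowsStep] at hy
  split_ifs at hy with h1 h2 h3 h4
  · exact h y hy
  · exact h y hy
  · rcases List.mem_append.mp hy with hy | hy
    · exact h y hy
    · have : y = r - min (min (PySem.Int.mod r 3 + 1) st.1) (r - 2) := by simpa using hy
      rw [pymod3] at h4
      omega
  · exact h y hy
  · exact h y hy

lemma lows_twos_wf : ∀ (low : List Int) (d : Int) (surv twos : List Int),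
    (∀ y ∈ twos, y % 3 = 2) →
    ∀ y ∈ (low.foldl lowsStep (d, surv, twos)).2.2, y % 3 = 2 := by
  intro low
  induction low with
  | nil => intro d surv twos h; exact h
  | cons r low ih =>
    intro d surv twos h
    rw [List.foldl_cons]
    have hstep := lowsStep_twos (d, surv, twos) r h
    have := ih (lowsStep (d, surv, twos) r).1 (lowsStep (d, surv, twos) r).2.1
      (lowsStep (d, surv, twos) r).2.2 hstep
    simpa using this

-- ===== VERDICT (by name: the statement is the Claim_ definition above) =====
theorem getRepetitionCost_spec : Claim_equal_getRepetitionCost := by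
  unfold Claim_equal_getRepetitionCost
  intro reps toDelete _
  unfold Spec_getRepetitionCost
  match reps with
  | [] => rfl
  | [r] => rfl
  | a :: b :: l =>
    -- A's heap loop computes `sim` on the multiset of lengths
    have hA : getRepetitionCost (a :: b :: l) toDelete = sim toDelete.toNat (a :: b :: l) := by
      have hw : ∀ p ∈ (a :: b :: l).map (fun r => (PySem.Int.mod r 3, r)), p.1 = p.2 % 3 := by
        intro p hp
        simp only [List.mem_map] at hp
        obtain ⟨x, _, rfl⟩ := hp
        simp [pymod3]
      have hms : ((a :: b :: l).map (fun r => (PySem.Int.mod r 3, r))).map Prod.snd = (a :: b :: l) := by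
        rw [List.map_map]
        simp [Function.comp_def]
      have hperm : (((a :: b :: l).map (fun r => (PySem.Int.mod r 3, r))).map Prod.snd).Perm
          (a :: b :: l) := by
        rw [hms]
      exact aLoop_sim toDelete.toNat ((a :: b :: l).map (fun r => (PySem.Int.mod r 3, r))) (a :: b :: l)
        hperm hw
    -- class membership facts
    have hcls0 : ∀ x ∈ (PySem.List.sorted ((a :: b :: l).filter (fun r => PySem.Int.mod r 3 == 0)) (fun r => r)), x % 3 = 0 := by
      intro x hx
      rw [PySem.List.mem_sorted] at hx
      have := (List.mem_filter.mp hx).2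
      simpa [pymod3] using this
    have hcls1 : ∀ x ∈ (PySem.List.sorted ((a :: b :: l).filter (fun r => PySem.Int.mod r 3 == 1)) (fun r => r)), x % 3 = 1 := by
      intro x hx
      rw [PySem.List.mem_sorted] at hx
      have := (List.mem_filter.mp hx).2
      simpa [pymod3] using this
    have hclsH : ∀ x ∈ ((a :: b :: l).filter (fun r => PySem.Int.mod r 3 == 2)), x % 3 = 2 := by
      intro x hx
      have := (List.mem_filter.mp hx).2
      simpa [pymod3] using this
    -- the two sorted low-class lists are key-sorted
    have hpwZ : List.Pairwise kLE (PySem.List.sorted ((a :: b :: l).filter (fun r => PySem.Int.mod r 3 == 0)) (fun r => r)) := by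
      refine List.Pairwise.imp_of_mem ?_ (PySem.List.sorted_pairwise ((a :: b :: l).filter (fun r => PySem.Int.mod r 3 == 0)) (fun r => r))
      intro x y hx hy hle
      have h1 := hcls0 x hx
      have h2 := hcls0 y hy
      have hle' : x ≤ y := hle
      unfold kLE
      omega
    have hpwO : List.Pairwise kLE (PySem.List.sorted ((a :: b :: l).filter (fun r => PySem.Int.mod r 3 == 1)) (fun r => r)) := by
      refine List.Pairwise.imp_of_mem ?_ (PySem.List.sorted_pairwise ((a :: b :: l).filter (fun r => PySem.Int.mod r 3 == 1)) (fun r => r))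
      intro x y hx hy hle
      have h1 := hcls1 x hx
      have h2 := hcls1 y hy
      have hle' : x ≤ y := hle
      unfold kLE
      omega
    have hpwZO : List.Pairwise kLE ((PySem.List.sorted ((a :: b :: l).filter (fun r => PySem.Int.mod r 3 == 0)) (fun r => r)) ++ (PySem.List.sorted ((a :: b :: l).filter (fun r => PySem.Int.mod r 3 == 1)) (fun r => r))) := by
      rw [List.pairwise_append]
      refine ⟨hpwZ, hpwO, ?_⟩
      intro x hx y hy
      have h1 := hcls0 x hx
      have h2 := hcls1 y hy
      unfold kLE
      omega
    have hclsZO : ∀ x ∈ (PySem.List.sorted ((a :: b :: l).filter (fun r => PySem.Int.mod r 3 == 0)) (fun r => r)) ++ (PySem.List.sorted ((a :: b :: l).filter (fun r => PySem.Int.mod r 3 == 1)) (fun r => r)), x % 3 ≤ 1 := by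
      intro x hx
      rcases List.mem_append.mp hx with hx | hx
      · have := hcls0 x hx; omega
      · have := hcls1 x hx; omega
    have h2H : ∀ y ∈ ((a :: b :: l).filter (fun r => PySem.Int.mod r 3 == 2)) ++ ([] : List Int), y % 3 = 2 := by
      intro y hy
      rcases List.mem_append.mp hy with hy | hy
      · exact hclsH y hy
      · simp at hy
    -- the class-2 pool
    have htwos : ∀ y ∈ (((PySem.List.sorted ((a :: b :: l).filter (fun r => PySem.Int.mod r 3 == 0)) (fun r => r)) ++ (PySem.List.sorted ((a :: b :: l).filter (fun r => PySem.Int.mod r 3 == 1)) (fun r => r))).foldl lowsStep (toDelete, [], [])).2.2, y % 3 = 2 :=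
      lows_twos_wf ((PySem.List.sorted ((a :: b :: l).filter (fun r => PySem.Int.mod r 3 == 0)) (fun r => r)) ++ (PySem.List.sorted ((a :: b :: l).filter (fun r => PySem.Int.mod r 3 == 1)) (fun r => r))) toDelete [] [] (by intro y hy; simp at hy)
    have hpoolcls : ∀ x ∈ (PySem.List.sorted (((a :: b :: l).filter (fun r => PySem.Int.mod r 3 == 2)) ++ (((PySem.List.sorted ((a :: b :: l).filter (fun r => PySem.Int.mod r 3 == 0)) (fun r => r)) ++ (PySem.List.sorted ((a :: b :: l).filter (fun r => PySem.Int.mod r 3 == 1)) (fun r => r))).foldl lowsStep (toDelete, [], [])).2.2) (fun r => r)), x % 3 = 2 := by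
      intro x hx
      rw [PySem.List.mem_sorted] at hx
      rcases List.mem_append.mp hx with hx | hx
      · exact hclsH x hx
      · exact htwos x hx
    have hpoolpw : List.Pairwise (· ≤ ·) (PySem.List.sorted (((a :: b :: l).filter (fun r => PySem.Int.mod r 3 == 2)) ++ (((PySem.List.sorted ((a :: b :: l).filter (fun r => PySem.Int.mod r 3 == 0)) (fun r => r)) ++ (PySem.List.sorted ((a :: b :: l).filter (fun r => PySem.Int.mod r 3 == 1)) (fun r => r))).foldl lowsStep (toDelete, [], [])).2.2) (fun r => r)) :=
      PySem.List.sorted_pairwise (((a :: b :: l).filter (fun r => PySem.Int.mod r 3 == 2)) ++ (((PySem.List.sorted ((a :: b :: l).filter (fun r => PySem.Int.mod r 3 == 0)) (fun r => r)) ++ (PySem.List.sorted ((a :: b :: l).filter (fun r => PySem.Int.mod r 3 == 1)) (fun r => r))).foldl lowsStep (toDelete, [], [])).2.2) (fun r => r)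
    -- the permutation reps ~ zeros ++ ones ++ highs
    have hg1 : ((a :: b :: l).filter (fun x => !(PySem.Int.mod x 3 == 0))).filter (fun r => PySem.Int.mod r 3 == 1) = ((a :: b :: l).filter (fun r => PySem.Int.mod r 3 == 1)) := by
      rw [List.filter_filter]
      refine List.filter_congr ?_
      intro x _
      rcases (show x % 3 = 0 ∨ x % 3 = 1 ∨ x % 3 = 2 from by omega) with h | h | h <;>
        simp [pymod3, h]
    have hg2 : ((a :: b :: l).filter (fun x => !(PySem.Int.mod x 3 == 0))).filter (fun x => !(PySem.Int.mod x 3 == 1)) = ((a :: b :: l).filter (fun r => PySem.Int.mod r 3 == 2)) := by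
      rw [List.filter_filter]
      refine List.filter_congr ?_
      intro x _
      rcases (show x % 3 = 0 ∨ x % 3 = 1 ∨ x % 3 = 2 from by omega) with h | h | h <;>
        simp [pymod3, h]
    have p2 : (((a :: b :: l).filter (fun r => PySem.Int.mod r 3 == 1)) ++ ((a :: b :: l).filter (fun r => PySem.Int.mod r 3 == 2))).Perm ((a :: b :: l).filter (fun x => !(PySem.Int.mod x 3 == 0))) := by
      rw [← hg1, ← hg2]
      exact List.filter_append_perm _ ((a :: b :: l).filter (fun x => !(PySem.Int.mod x 3 == 0)))
    have hbig : (((PySem.List.sorted ((a :: b :: l).filter (fun r => PySem.Int.mod r 3 == 0)) (fun r => r)) ++ (PySem.List.sorted ((a :: b :: l).filter (fun r => PySem.Int.mod r 3 == 1)) (fun r => r))) ++ (((a :: b :: l).filter (fun r => PySem.Int.mod r 3 == 2)) ++ ([] : List Int))).Perm (a :: b :: l) := by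
      refine List.Perm.trans ?_ (List.filter_append_perm (fun r => PySem.Int.mod r 3 == 0) (a :: b :: l))
      rw [List.append_nil, List.append_assoc]
      exact ((PySem.List.sorted_perm ((a :: b :: l).filter (fun r => PySem.Int.mod r 3 == 0)) (fun r => r) false).append
        (((PySem.List.sorted_perm ((a :: b :: l).filter (fun r => PySem.Int.mod r 3 == 1)) (fun r => r) false).append (List.Perm.refl ((a :: b :: l).filter (fun r => PySem.Int.mod r 3 == 2)))).trans p2))
    -- chain everything together
    have hph := ph ((PySem.List.sorted ((a :: b :: l).filter (fun r => PySem.Int.mod r 3 == 0)) (fun r => r)) ++ (PySem.List.sorted ((a :: b :: l).filter (fun r => PySem.Int.mod r 3 == 1)) (fun r => r))) toDelete [] [] ((a :: b :: l).filter (fun r => PySem.Int.mod r 3 == 2)) hpwZO hclsZO h2H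
    have hph2 := ph2 (PySem.List.sorted (((a :: b :: l).filter (fun r => PySem.Int.mod r 3 == 2)) ++ (((PySem.List.sorted ((a :: b :: l).filter (fun r => PySem.Int.mod r 3 == 0)) (fun r => r)) ++ (PySem.List.sorted ((a :: b :: l).filter (fun r => PySem.Int.mod r 3 == 1)) (fun r => r))).foldl lowsStep (toDelete, [], [])).2.2) (fun r => r)) (((PySem.List.sorted ((a :: b :: l).filter (fun r => PySem.Int.mod r 3 == 0)) (fun r => r)) ++ (PySem.List.sorted ((a :: b :: l).filter (fun r => PySem.Int.mod r 3 == 1)) (fun r => r))).foldl lowsStep (toDelete, [], [])).1 (((PySem.List.sorted ((a :: b :: l).filter (fun r => PySem.Int.mod r 3 == 0)) (fun r => r)) ++ (PySem.List.sorted ((a :: b :: l).filter (fun r => PySem.Int.mod r 3 == 1)) (fun r => r))).foldl lowsStep (toDelete, [], [])).2.1 hpoolpw hpoolcls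
    have hsimP : sim (((PySem.List.sorted ((a :: b :: l).filter (fun r => PySem.Int.mod r 3 == 0)) (fun r => r)) ++ (PySem.List.sorted ((a :: b :: l).filter (fun r => PySem.Int.mod r 3 == 1)) (fun r => r))).foldl lowsStep (toDelete, [], [])).1.toNat (PySem.List.sorted (((a :: b :: l).filter (fun r => PySem.Int.mod r 3 == 2)) ++ (((PySem.List.sorted ((a :: b :: l).filter (fun r => PySem.Int.mod r 3 == 0)) (fun r => r)) ++ (PySem.List.sorted ((a :: b :: l).filter (fun r => PySem.Int.mod r 3 == 1)) (fun r => r))).foldl lowsStep (toDelete, [], [])).2.2) (fun r => r)) = sim (((PySem.List.sorted ((a :: b :: l).filter (fun r => PySem.Int.mod r 3 == 0)) (fun r => r)) ++ (PySem.List.sorted ((a :: b :: l).filter (fun r => PySem.Int.mod r 3 == 1)) (fun r => r))).foldl lowsStep (toDelete, [], [])).1.toNat (((a :: b :: l).filter (fun r => PySem.Int.mod r 3 == 2)) ++ (((PySem.List.sorted ((a :: b :: l).filter (fun r => PySem.Int.mod r 3 == 0)) (fun r => r)) ++ (PySem.List.sorted ((a :: b :: l).filter (fun r => PySem.Int.mod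 r 3 == 1)) (fun r => r))).foldl lowsStep (toDelete, [], [])).2.2) :=
      sim_perm _ (PySem.List.sorted_perm (((a :: b :: l).filter (fun r => PySem.Int.mod r 3 == 2)) ++ (((PySem.List.sorted ((a :: b :: l).filter (fun r => PySem.Int.mod r 3 == 0)) (fun r => r)) ++ (PySem.List.sorted ((a :: b :: l).filter (fun r => PySem.Int.mod r 3 == 1)) (fun r => r))).foldl lowsStep (toDelete, [], [])).2.2) (fun r => r) false)
    have hBsum : getRepetitionCost_alt (a :: b :: l) toDelete
        = sumdiv ((PySem.List.sorted (((a :: b :: l).filter (fun r => PySem.Int.mod r 3 == 2)) ++ (((PySem.List.sorted ((a :: b :: l).filter (fun r => PySem.Int.mod r 3 == 0)) (fun r => r)) ++ (PySem.List.sorted ((a :: b :: l).filter (fun r => PySem.Int.mod r 3 == 1)) (fun r => r))).foldl lowsStep (toDelete, [], [])).2.2) (fun r => r)).foldl poolStep ((((PySem.List.sorted ((a :: b :: l).filter (fun r => PySem.Int.mod r 3 == 0)) (fun r => r)) ++ (PySem.List.sorted ((a :: b :: l).filter (fun r => PySem.Int.mod r 3 == 1)) (fun r => r))).foldl lowsStep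 (toDelete, [], [])).1, (((PySem.List.sorted ((a :: b :: l).filter (fun r => PySem.Int.mod r 3 == 0)) (fun r => r)) ++ (PySem.List.sorted ((a :: b :: l).filter (fun r => PySem.Int.mod r 3 == 1)) (fun r => r))).foldl lowsStep (toDelete, [], [])).2.1)).2 := rfl
    rw [hA, hBsum, hph2, hsimP, hph, sumdiv_nil, zero_add]
    exact sim_perm _ hbig.symm
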